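-- pv_equiv track=rewrite | github.com/XyzHuy/-DL-Fine-tuning-coding-model | data/solution/Solution1643.py | kthSmallestPath
-- ===== SOURCE A (Python) =====
-- from math import comb
-- from typing import List
--
-- def kthSmallestPath(destination: List[int], k: int) -> str:
--     v, h = destination
--     path = []
--     total_moves = v + h
--
--     for total in range(total_moves, 0, -1):
--         if h > 0:
--             # Calculate the number of paths if we take 'H' now
--             paths_with_H = comb(total - 1, h - 1)
--             if k <= paths_with_H:
--                 path.append('H')
--                 h -= 1
--             else:
--                 path.append('V')
--                 k -= paths_with_H
--                 v -= 1
--         else: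
--             # If no more 'H' moves are left, we must take 'V'
--             path.append('V')
--             v -= 1
--
--     return ''.join(path)
-- ===== SOURCE B (Python) =====
-- from math import comb
-- from typing import List
--
-- def kthSmallestPath(destination: List[int], k: int) -> str:
--     # Run-based unranking: emit the gap of V's before each H in one chunk,
--     # instead of deciding one character per position.
--     v, h = destination
--     parts = []
--     rem = v + h            # moves still to emit
--     while h > 0 and rem > 0:
--         g = 0              # gap: V's emitted before the next H
--         while g < rem:
--             c = comb(rem - g - 1, h - 1)
--             if k <= c:
--                 break
--             k -= c
--             g += 1
--         if g == rem:       # k exceeds every remaining path: only V's remain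
--             break
--         parts.append('V' * g + 'H')
--         rem -= g + 1
--         h -= 1
--     if rem > 0:
--         parts.append('V' * rem)
--     return ''.join(parts)
-- ===== Notes on version B (the rewrite author's own statement) =====
-- stated objective: alternative
-- what changed: B replaces A's per-position loop (one character decided per step over all v+h steps) by run-based unranking: an inner gap search finds how many V's precede the next H and emits the whole run as one chunk, with leftover V's appended once after the loop.
import Mathlib
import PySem

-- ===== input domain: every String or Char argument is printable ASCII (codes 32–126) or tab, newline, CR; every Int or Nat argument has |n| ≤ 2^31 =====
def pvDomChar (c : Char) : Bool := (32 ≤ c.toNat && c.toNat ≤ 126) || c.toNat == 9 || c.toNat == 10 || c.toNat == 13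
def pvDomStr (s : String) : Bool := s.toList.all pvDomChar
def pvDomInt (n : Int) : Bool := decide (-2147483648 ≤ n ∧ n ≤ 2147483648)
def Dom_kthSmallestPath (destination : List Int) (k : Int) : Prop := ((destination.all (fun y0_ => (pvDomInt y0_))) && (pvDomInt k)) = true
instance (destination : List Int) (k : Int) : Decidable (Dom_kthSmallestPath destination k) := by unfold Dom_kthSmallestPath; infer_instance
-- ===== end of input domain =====

-- B replaces A's one-decision-per-position loop by run-based unranking (a gap of V's
-- and its H are found and emitted as one chunk); objective: alternative structure, same cost class.

-- ===== PORT A =====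
-- math.comb(n, r): at every call site n ≥ 0 and r ≥ 0 hold, where Nat.choose on the
-- toNat images is exact (comb(n,r) = 0 for r > n ≥ 0, as in Python).
def pvComb (n r : Int) : Int := (Nat.choose n.toNat r.toNat : Int)

-- 'for total in range(total_moves, 0, -1)' as structural recursion: fuel t runs
-- total_moves.toNat, total_moves.toNat - 1, …, 1; the loop variable total = (t : Int).
def pvALoop : Nat → Int → Int → Int → List String → List String
  | 0, _, _, _, path => path
  | t + 1, v, h, k, path =>
    if h > 0 then
      let pathsWithH : Int := pvComb (((t : Int) + 1) - 1) (h - 1)  -- comb(total - 1, h - 1)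
      if k ≤ pathsWithH then pvALoop t v (h - 1) k (path ++ ["H"])
      else pvALoop t (v - 1) h (k - pathsWithH) (path ++ ["V"])
    else pvALoop t (v - 1) h k (path ++ ["V"])

def kthSmallestPath (destination : List Int) (k : Int) : String :=
  match destination with
  | [v, h] => PySem.Str.join "" (pvALoop (v + h).toNat v h k [])  -- ''.join(path)
  | _ => ""  -- 'v, h = destination' raises ValueError: excluded by Pre_

-- ===== PORT B =====
-- math.comb again (Source B's own import); n ≥ 0, r ≥ 0 at every call site, so exact
def pvCombB (n r : Int) : Int := (Nat.choose n.toNat r.toNat : Int)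

-- inner 'while g < rem' of Source B: fuel left = rem.toNat - g, so 'g < rem' ↔ left > 0
def pvFindGap (left : Nat) (rem h k g : Int) : Int × Int :=
  if h0 : left = 0 then (g, k)
  else
    let c : Int := pvCombB (rem - g - 1) (h - 1)
    if k ≤ c then (g, k) else pvFindGap (left - 1) rem h (k - c) (g + 1)
termination_by left
decreasing_by omega

-- outer 'while h > 0 and rem > 0' of Source B: h decreases by exactly 1 per iteration,
-- so fuel h.toNat never runs out while the guard holds; 'V' * g is replicate g.toNat (exact).
def pvBLoop (fuel : Nat) (rem h k : Int) (parts : List String) : List String × Int :=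
  if h0 : fuel = 0 then (parts, rem)
  else
    if h > 0 ∧ rem > 0 then
      let gk := pvFindGap rem.toNat rem h k 0
      if gk.1 = rem then (parts, rem)  -- break
      else pvBLoop (fuel - 1) (rem - gk.1 - 1) (h - 1) gk.2
             (parts ++ [String.ofList (List.replicate gk.1.toNat 'V') ++ "H"])
    else (parts, rem)
termination_by fuel
decreasing_by omega

-- 'v, h = destination' (raises ValueError unless the list has exactly two elements)
def pvBUnpack (xs : List Int) : Option (Int × Int) :=
  if xs.length = 2 then some (xs[0]!, xs[1]!) else none

def kthSmallestPath_alt (destination : List Int) (k : Int) : String :=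
  match pvBUnpack destination with
  | some (v, h) =>
    let pr := pvBLoop h.toNat (v + h) h k []
    let parts := if pr.2 > 0 then pr.1 ++ [String.ofList (List.replicate pr.2.toNat 'V')] else pr.1
    PySem.Str.join "" parts
  | none => ""  -- excluded by Pre_, as in A

-- ===== PRECONDITION & SPEC =====
-- Pre_ excludes only lists of length ≠ 2, on which Python A raises ValueError (unpacking).
def Pre_kthSmallestPath (destination : List Int) (k : Int) : Prop := destination.length = 2
instance (destination : List Int) (k : Int) : Decidable (Pre_kthSmallestPath destination k) := by unfold Pre_kthSmallestPath; infer_instance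

def pvWitness_kthSmallestPath : List Int × Int := ([2, 3], 4)

def Spec_kthSmallestPath (destination : List Int) (k : Int) (out : String) : Prop := out = kthSmallestPath_alt destination k
instance (destination : List Int) (k : Int) (out : String) : Decidable (Spec_kthSmallestPath destination k out) := by unfold Spec_kthSmallestPath; infer_instance

-- ===== CLAIM (what is proved, stated in full; the proofs are below) =====
def Claim_equal_kthSmallestPath : Prop := ∀ (destination : List Int) (k : Int), Dom_kthSmallestPath destination k → Pre_kthSmallestPath destination k → Spec_kthSmallestPath destination k (kthSmallestPath destination k)

-- ===== LEMMAS AND PROOFS =====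

-- the character stream of a list of chunks
def pvChars (ps : List String) : List Char := (ps.map String.toList).flatten

theorem pvJoin_chars (ps : List String) :
    (PySem.Str.join "" ps).toList = pvChars ps := by
  rw [PySem.Str.toList_join]
  show PySem.Chars.join "".toList (ps.map String.toList) = pvChars ps
  have h : ∀ pss : List (List Char), PySem.Chars.join [] pss = pss.flatten := by
    intro pss
    induction pss with
    | nil => simp [PySem.Chars.join_nil]
    | cons p rest ih =>
      cases rest with
      | nil => simp [PySem.Chars.join_singleton]
      | cons q rest' =>
        rw [PySem.Chars.join_cons_cons]
        simp only [List.flatten_cons] at ih ⊢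
        rw [ih]; simp
  simpa [pvChars] using h (ps.map String.toList)

-- the abstract character stream both loops produce (A never reads v: only total, h, k matter)
def pvLA : Nat → Int → Int → List Char
  | 0, _, _ => []
  | t + 1, h, k =>
    if h > 0 then
      let c : Int := pvComb (t : Int) (h - 1)
      if k ≤ c then 'H' :: pvLA t (h - 1) k else 'V' :: pvLA t h (k - c)
    else 'V' :: pvLA t h k

theorem pvLA_nonpos (t : Nat) (h k : Int) (hh : ¬ h > 0) :
    pvLA t h k = List.replicate t 'V' := by
  induction t generalizing k with
  | zero => simp [pvLA]
  | succ t ih => simp [pvLA, hh, ih, List.replicate_succ]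

theorem pvALoop_chars (t : Nat) : ∀ (v h k : Int) (path : List String),
    pvChars (pvALoop t v h k path) = pvChars path ++ pvLA t h k := by
  induction t with
  | zero => intro v h k path; simp [pvALoop, pvLA]
  | succ t ih =>
    intro v h k path
    have e : ((t : Int) + 1) - 1 = (t : Int) := by ring
    by_cases hh : h > 0
    · simp only [pvALoop, pvLA, hh, if_pos, e]
      by_cases hk : k ≤ pvComb (t : Int) (h - 1)
      · rw [if_pos hk, if_pos hk, ih]; simp [pvChars]
      · rw [if_neg hk, if_neg hk, ih]; simp [pvChars]
    · simp only [pvALoop, pvLA, hh, if_false, if_neg, not_false_iff]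
      rw [ih]; simp [pvChars]

theorem pvCombB_eq : pvCombB = pvComb := rfl

theorem pvFindGap_zero (rem h k g : Int) : pvFindGap 0 rem h k g = (g, k) := by
  rw [pvFindGap]; simp

theorem pvFindGap_succ (left : Nat) (rem h k g : Int) :
    pvFindGap (left + 1) rem h k g =
      if k ≤ pvComb (rem - g - 1) (h - 1) then (g, k)
      else pvFindGap left rem h (k - pvComb (rem - g - 1) (h - 1)) (g + 1) := by
  rw [pvFindGap]; simp [pvCombB_eq]

theorem pvBLoop_zero (rem h k : Int) (parts : List String) :
    pvBLoop 0 rem h k parts = (parts, rem) := by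
  rw [pvBLoop]; simp

theorem pvBLoop_succ (fuel : Nat) (rem h k : Int) (parts : List String) :
    pvBLoop (fuel + 1) rem h k parts =
      if h > 0 ∧ rem > 0 then
        if (pvFindGap rem.toNat rem h k 0).1 = rem then (parts, rem)
        else pvBLoop fuel (rem - (pvFindGap rem.toNat rem h k 0).1 - 1) (h - 1)
               (pvFindGap rem.toNat rem h k 0).2
               (parts ++ [String.ofList (List.replicate (pvFindGap rem.toNat rem h k 0).1.toNat 'V') ++ "H"])
      else (parts, rem) := by
  rw [pvBLoop]; simp

theorem pvFindGap_ge (left : Nat) : ∀ (rem h k g : Int),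
    g ≤ (pvFindGap left rem h k g).1 := by
  induction left with
  | zero => intro rem h k g; simp [pvFindGap_zero]
  | succ left ih =>
    intro rem h k g
    rw [pvFindGap_succ]
    split
    · simp
    · exact le_trans (by omega) (ih rem h (k - pvComb (rem - g - 1) (h - 1)) (g + 1))

-- the inner gap search of B peels exactly the leading 'V' run of the abstract stream
theorem pvFindGap_spec (left : Nat) : ∀ (rem g h k : Int), h > 0 → rem - g = (left : Int) →
    pvLA left h k =
      List.replicate ((pvFindGap left rem h k g).1 - g).toNat 'V' ++
        (if (pvFindGap left rem h k g).1 = rem then []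
         else 'H' :: pvLA (rem - (pvFindGap left rem h k g).1 - 1).toNat (h - 1)
                (pvFindGap left rem h k g).2) := by
  induction left with
  | zero =>
    intro rem g h k hh he
    have : g = rem := by omega
    simp [pvFindGap_zero, pvLA, this]
  | succ left ih =>
    intro rem g h k hh he
    rw [pvFindGap_succ]
    have hc : pvComb (rem - g - 1) (h - 1) = pvComb (left : Int) (h - 1) := by
      have : rem - g - 1 = (left : Int) := by omega
      rw [this]
    simp only [pvLA, hh, if_pos]
    by_cases hk : k ≤ pvComb (rem - g - 1) (h - 1)
    · have hk' : k ≤ pvComb (left : Int) (h - 1) := by rwa [hc] at hk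
      have hg : g ≠ rem := by omega
      have h1 : rem - g - 1 = (left : Int) := by omega
      simp [hk, hk', hg, h1]
    · have hk' : ¬ k ≤ pvComb (left : Int) (h - 1) := by rwa [hc] at hk
      have he' : rem - (g + 1) = (left : Int) := by omega
      have hrec := ih rem (g + 1) h (k - pvComb (rem - g - 1) (h - 1)) hh he'
      have hge := pvFindGap_ge left rem h (k - pvComb (rem - g - 1) (h - 1)) (g + 1)
      rw [hc] at hrec hge ⊢
      rw [if_neg hk', if_neg hk']
      rw [hrec]
      have hone : ((pvFindGap left rem h (k - pvComb (left : Int) (h - 1)) (g + 1)).1 - g).toNat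
           = ((pvFindGap left rem h (k - pvComb (left : Int) (h - 1)) (g + 1)).1 - (g + 1)).toNat + 1 := by
        omega
      rw [hone, List.replicate_succ]
      simp

-- the outer loop of B (plus its trailing 'V' * rem chunk) produces the abstract stream
theorem pvBLoop_spec (fuel : Nat) : ∀ (h rem k : Int) (parts : List String), h ≤ (fuel : Int) →
    pvChars (pvBLoop fuel rem h k parts).1 ++
      List.replicate ((pvBLoop fuel rem h k parts).2).toNat 'V' =
    pvChars parts ++ pvLA rem.toNat h k := by
  induction fuel with
  | zero =>
    intro h rem k parts hf
    have hh : ¬ h > 0 := by omega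
    simp [pvBLoop_zero, pvLA_nonpos _ _ _ hh]
  | succ fuel ih =>
    intro h rem k parts hf
    by_cases hg : h > 0 ∧ rem > 0
    · obtain ⟨hh, hr⟩ := hg
      have he : rem - 0 = ((rem.toNat : Nat) : Int) := by omega
      have hspec := pvFindGap_spec rem.toNat rem 0 h k hh he
      rw [pvBLoop_succ]
      simp only [hh, hr, and_self, if_pos]
      set gk := pvFindGap rem.toNat rem h k 0 with hgk
      by_cases hbrk : gk.1 = rem
      · simp only [hbrk, if_pos]
        rw [hspec]
        simp [hbrk]
      · simp only [hbrk, if_false]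
        rw [ih (h - 1) (rem - gk.1 - 1) gk.2
              (parts ++ [String.ofList (List.replicate gk.1.toNat 'V') ++ "H"]) (by omega)]
        rw [hspec]
        simp only [hbrk, if_false, pvChars, List.map_append, List.flatten_append]
        simp [String.toList_ofList]
    · rw [pvBLoop_succ]
      simp only [hg, if_false]
      rcases not_and_or.mp hg with hh | hr
      · simp [pvLA_nonpos _ _ _ hh]
      · have h0 : rem.toNat = 0 := by omega
        simp [h0, pvLA]

-- ===== VERDICT (by name: the statement is the Claim_ definition above) =====
theorem kthSmallestPath_spec : Claim_equal_kthSmallestPath := by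
  intro destination k _hdom hpre
  unfold Spec_kthSmallestPath
  match destination, hpre with
  | [v, h], _ =>
    show PySem.Str.join "" (pvALoop (v + h).toNat v h k []) = kthSmallestPath_alt [v, h] k
    rw [← String.toList_inj]
    unfold kthSmallestPath_alt pvBUnpack
    simp only [List.length_cons, List.length_nil, List.getElem!_cons_zero, List.getElem!_cons_succ,
      show (0 : Nat) + 1 + 1 = 2 by rfl, if_pos rfl, if_true]
    rw [pvJoin_chars, pvJoin_chars, pvALoop_chars]
    have hb := pvBLoop_spec h.toNat h (v + h) k [] (Int.self_le_toNat h)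
    set pr := pvBLoop h.toNat (v + h) h k [] with hpr
    by_cases hrem : pr.2 > 0
    · simp only [hrem, if_pos]
      rw [show pvChars (pr.1 ++ [String.ofList (List.replicate pr.2.toNat 'V')])
            = pvChars pr.1 ++ List.replicate pr.2.toNat 'V' by simp [pvChars, String.toList_ofList]]
      rw [hb]
    · have h0 : pr.2.toNat = 0 := by omega
      simp only [hrem, if_false]
      rw [← hb, h0]
      simp [pvChars]
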